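-- pv_equiv track=rewrite | github.com/devanshuDesai/withdraw-tool | run.py | get_consecutive
-- ===== SOURCE A (Python) =====
-- def get_consecutive(arr):
--     num_missing = 0
--     for hw in arr[::-1]:
--         if hw:
--             num_missing += 1
--         else:
--             break
--     return num_missing
-- ===== SOURCE B (Python) =====
-- def get_consecutive(arr):
--     last_false = -1
--     for i, x in enumerate(arr):
--         if not x:
--             last_false = i
--     return len(arr) - 1 - last_false
-- ===== Notes on version B (the rewrite author's own statement) =====
-- stated objective: alternative
-- what changed: Replaces the reversed-iteration count-until-break with a single forward pass that records the index of the last falsy element and derives the trailing-truthy count arithmetically as len(arr)-1-last_false.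
import Mathlib
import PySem

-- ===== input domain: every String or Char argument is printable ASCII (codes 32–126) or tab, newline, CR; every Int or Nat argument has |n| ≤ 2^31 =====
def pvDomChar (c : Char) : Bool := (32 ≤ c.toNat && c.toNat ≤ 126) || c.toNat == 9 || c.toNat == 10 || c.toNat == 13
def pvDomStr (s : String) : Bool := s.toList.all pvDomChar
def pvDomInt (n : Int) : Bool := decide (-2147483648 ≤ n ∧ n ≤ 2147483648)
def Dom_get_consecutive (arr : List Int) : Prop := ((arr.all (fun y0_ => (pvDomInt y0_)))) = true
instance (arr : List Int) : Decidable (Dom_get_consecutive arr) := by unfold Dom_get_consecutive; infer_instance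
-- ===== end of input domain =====

-- B replaces A's reversed count-until-break loop by one forward pass recording the last falsy index; same O(n) cost (objective: alternative).

-- ===== PORT A =====
-- the for-with-break over arr[::-1]; arr[::-1] is List.reverse (exact for step -1, full slice)
def getConsecLoopA : List Int → Int → Int
  | [], acc => acc
  | hw :: rest, acc => if hw ≠ 0 then getConsecLoopA rest (acc + 1) else acc

def get_consecutive (arr : List Int) : Int :=
  getConsecLoopA arr.reverse 0

-- ===== PORT B =====
def get_consecutive_alt (arr : List Int) : Int :=
  let last_false :=
    (PySem.List.enumerate arr).foldl (fun lf p => if p.2 = 0 then p.1 else lf) (-1)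
  (arr.length : Int) - 1 - last_false

-- ===== PRECONDITION & SPEC =====
def Spec_get_consecutive (arr : List Int) (out : Int) : Prop := out = get_consecutive_alt arr
instance (arr : List Int) (out : Int) : Decidable (Spec_get_consecutive arr out) := by unfold Spec_get_consecutive; infer_instance

-- ===== CLAIM (what is proved, stated in full; the proofs are below) =====
def Claim_equal_get_consecutive : Prop := ∀ (arr : List Int), Dom_get_consecutive arr → Spec_get_consecutive arr (get_consecutive arr)

-- ===== LEMMAS AND PROOFS =====
theorem getConsecLoopA_acc (l : List Int) (acc : Int) :
    getConsecLoopA l acc = getConsecLoopA l 0 + acc := by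
  induction l generalizing acc with
  | nil => simp [getConsecLoopA]
  | cons x xs ih =>
    by_cases h : x = 0 <;> simp [getConsecLoopA, h]
    rw [ih (acc + 1), ih 1]; ring

-- the last-falsy-index fold with any start index
theorem lastFalse_append (ys : List Int) (x : Int) (s init : Int) :
    (PySem.List.enumerate (ys ++ [x]) s).foldl (fun lf p => if p.2 = 0 then p.1 else lf) init
      = (if x = 0 then s + ys.length
         else (PySem.List.enumerate ys s).foldl (fun lf p => if p.2 = 0 then p.1 else lf) init) := by
  rw [PySem.List.enumerate_append]
  simp [PySem.List.enumerate_cons, PySem.List.enumerate_nil]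

theorem get_consecutive_eq (arr : List Int) :
    get_consecutive arr = get_consecutive_alt arr := by
  induction arr using List.reverseRecOn with
  | nil => simp [get_consecutive, get_consecutive_alt, getConsecLoopA,
      PySem.List.enumerate_nil]
  | append_singleton ys x ih =>
    unfold get_consecutive get_consecutive_alt at *
    simp only [List.reverse_append, List.reverse_singleton, List.singleton_append]
    rw [lastFalse_append]
    by_cases h : x = 0
    · simp [getConsecLoopA, h]
    · simp only [getConsecLoopA, h, ne_eq, not_false_iff, if_pos]
      rw [getConsecLoopA_acc _ (0 + 1)]
      simp only at ih
      rw [ih]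
      simp
      ring

-- ===== VERDICT (by name: the statement is the Claim_ definition above) =====
theorem get_consecutive_spec : Claim_equal_get_consecutive := by
  intro arr _
  exact get_consecutive_eq arr
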